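-- pv_equiv track=rewrite | github.com/Vineyardcode/voynich_slop | scripts/phase92_ae_minimal_pairs.py | parse_word_into_chunks
-- ===== SOURCE A (Python) =====
-- GALLOWS_TRI = ['cth', 'ckh', 'cph', 'cfh']
--
-- GALLOWS_BI  = ['ch', 'sh', 'th', 'kh', 'ph', 'fh']
--
-- def eva_to_glyphs(word):
--     glyphs = []
--     i = 0
--     w = word.lower()
--     while i < len(w):
--         if i + 2 < len(w) and w[i:i+3] in GALLOWS_TRI:
--             glyphs.append(w[i:i+3]); i += 3
--         elif i + 1 < len(w) and w[i:i+2] in GALLOWS_BI: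
--             glyphs.append(w[i:i+2]); i += 2
--         else:
--             glyphs.append(w[i]); i += 1
--     return glyphs
--
-- SLOT1 = {'ch', 'sh', 'y'}
--
-- SLOT2_RUNS = {'e'}
--
-- SLOT2_SINGLE = {'q', 'a'}
--
-- SLOT3 = {'o'}
--
-- SLOT4_RUNS = {'i'}
--
-- SLOT4_SINGLE = {'d'}
--
-- SLOT5 = {'y', 'p', 'f', 'k', 'l', 'r', 's', 't',
--          'cth', 'ckh', 'cph', 'cfh', 'n', 'm'}
--
-- MAX_CHUNKS = 6
--
-- def parse_one_chunk(glyphs, pos):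
--     start = pos
--     chunk = []
--     slots_filled = []
--
--     if pos < len(glyphs) and glyphs[pos] in SLOT1:
--         chunk.append(glyphs[pos]); slots_filled.append(1); pos += 1
--
--     if pos < len(glyphs):
--         if glyphs[pos] in SLOT2_RUNS:
--             count = 0
--             while pos < len(glyphs) and glyphs[pos] in SLOT2_RUNS and count < 3:
--                 chunk.append(glyphs[pos]); pos += 1; count += 1
--             slots_filled.append(2)
--         elif glyphs[pos] in SLOT2_SINGLE:
--             chunk.append(glyphs[pos]); pos += 1
--             slots_filled.append(2)
--
--     if pos < len(glyphs) and glyphs[pos] in SLOT3: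
--         chunk.append(glyphs[pos]); slots_filled.append(3); pos += 1
--
--     if pos < len(glyphs):
--         if glyphs[pos] in SLOT4_RUNS:
--             count = 0
--             while pos < len(glyphs) and glyphs[pos] in SLOT4_RUNS and count < 3:
--                 chunk.append(glyphs[pos]); pos += 1; count += 1
--             slots_filled.append(4)
--         elif glyphs[pos] in SLOT4_SINGLE:
--             chunk.append(glyphs[pos]); pos += 1
--             slots_filled.append(4)
--
--     if pos < len(glyphs) and glyphs[pos] in SLOT5:
--         chunk.append(glyphs[pos]); slots_filled.append(5); pos += 1
--
--     if pos == start: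
--         return None, pos, []
--     return chunk, pos, slots_filled
--
-- def parse_word_into_chunks(word_str):
--     glyphs = eva_to_glyphs(word_str)
--     chunks = []
--     unparsed = []
--     pos = 0
--     slots_per_chunk = []
--
--     while pos < len(glyphs) and len(chunks) < MAX_CHUNKS:
--         chunk, new_pos, slots = parse_one_chunk(glyphs, pos)
--         if chunk is None:
--             unparsed.append(glyphs[pos]); pos += 1
--         else:
--             chunks.append(chunk); pos = new_pos
--             slots_per_chunk.append(slots)
--
--     while pos < len(glyphs):
--         unparsed.append(glyphs[pos]); pos += 1
--
--     return chunks, unparsed, glyphs, slots_per_chunk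
-- ===== SOURCE B (Python) =====
-- # B: online single-pass parser. Instead of A's repeated calls to a five-stage chunk
-- # parser over an indexed glyph array, B classifies each glyph once with a slot-pointer
-- # state machine (pointer + run-counter) that builds chunks incrementally and closes a
-- # chunk exactly when the next glyph cannot be placed; the tokenizer is a left-to-right
-- # DFA over single characters (pending-prefix buffer) instead of A's 3/2-char lookahead.
-- GALLOWS_TRI = ['cth', 'ckh', 'cph', 'cfh']
-- GALLOWS_BI  = ['ch', 'sh', 'th', 'kh', 'ph', 'fh']
--
-- SLOT1 = {'ch', 'sh', 'y'}
-- SLOT2_RUNS = {'e'}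
-- SLOT2_SINGLE = {'q', 'a'}
-- SLOT3 = {'o'}
-- SLOT4_RUNS = {'i'}
-- SLOT4_SINGLE = {'d'}
-- SLOT5 = {'y', 'p', 'f', 'k', 'l', 'r', 's', 't',
--          'cth', 'ckh', 'cph', 'cfh', 'n', 'm'}
-- MAX_CHUNKS = 6
--
--
-- def _step(buf, ch):
--     # DFA step: buf is a pending prefix ('', 'c', x in 'stkpf', or 'c'+x in 'tkpf');
--     # returns (emitted glyphs, new buffer).
--     if buf == '':
--         return ([], ch) if ch in 'cstkpf' else ([ch], '')
--     if buf == 'c':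
--         if ch == 'h':
--             return (['ch'], '')
--         if ch in 'tkpf':
--             return ([], 'c' + ch)
--         out, b = _step('', ch)
--         return (['c'] + out, b)
--     if len(buf) == 1:  # buf in 'stkpf'
--         if ch == 'h':
--             return ([buf + 'h'], '')
--         out, b = _step('', ch)
--         return ([buf] + out, b)
--     # buf == 'c' + x
--     if ch == 'h':
--         return ([buf + 'h'], '')
--     out, b = _step(buf[1], ch)
--     return (['c'] + out, b)
--
--
-- def eva_to_glyphs(word):
--     glyphs = []
--     buf = ''
--     for ch in word.lower():
--         out, buf = _step(buf, ch)
--         glyphs.extend(out)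
--     glyphs.extend(buf)  # leftover prefix flushes to single-char glyphs
--     return glyphs
--
--
-- def place(gl, p, rc):
--     # Try to place one glyph given slot pointer p (next admissible slot) and run
--     # counter rc (length of the run just filled at slot p-1, 0 if none).
--     # Returns (new p, new rc, slot number to record or None) or None if it cannot go.
--     if gl == 'e' or gl == 'i':
--         s = 2 if gl == 'e' else 4
--         if p == s + 1 and 1 <= rc < 3:
--             return (p, rc + 1, None)   # extend the current run, capped at 3
--         if p <= s:
--             return (s + 1, 1, s)       # start a new run
--         return None
--     for s, members in ((1, SLOT1), (2, SLOT2_SINGLE), (3, SLOT3),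
--                        (4, SLOT4_SINGLE), (5, SLOT5)):
--         if s >= p and gl in members:
--             return (s + 1, 0, s)
--     return None
--
--
-- def parse_word_into_chunks(word_str):
--     glyphs = eva_to_glyphs(word_str)
--     chunks = []
--     unparsed = []
--     slots_per_chunk = []
--     p, rc, chunk, slots = 1, 0, [], []
--     for k, gl in enumerate(glyphs):
--         res = place(gl, p, rc)
--         if res is None and chunk:
--             chunks.append(chunk)
--             slots_per_chunk.append(slots)
--             p, rc, chunk, slots = 1, 0, [], []
--             if len(chunks) == MAX_CHUNKS:
--                 unparsed.extend(glyphs[k:])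
--                 break
--             res = place(gl, p, rc)
--         if res is None:
--             unparsed.append(gl)
--             continue
--         p, rc, s = res
--         chunk.append(gl)
--         if s is not None:
--             slots.append(s)
--     if chunk:
--         chunks.append(chunk)
--         slots_per_chunk.append(slots)
--     return chunks, unparsed, glyphs, slots_per_chunk
-- ===== Notes on version B (the rewrite author's own statement) =====
-- stated objective: faster
-- what changed: A repeatedly re-runs a five-stage slot pipeline (parse_one_chunk) over an indexed glyph array with per-slot while loops; B is an online single-pass parser: each glyph is classified once by a slot-pointer/run-counter state machine that grows the current chunk incrementally and closes it exactly when a glyph cannot be placed, and the tokenizer is a character-by-character DFA with a pending-prefix buffer instead of A's 3/2-character lookahead slicing.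
import Mathlib
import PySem

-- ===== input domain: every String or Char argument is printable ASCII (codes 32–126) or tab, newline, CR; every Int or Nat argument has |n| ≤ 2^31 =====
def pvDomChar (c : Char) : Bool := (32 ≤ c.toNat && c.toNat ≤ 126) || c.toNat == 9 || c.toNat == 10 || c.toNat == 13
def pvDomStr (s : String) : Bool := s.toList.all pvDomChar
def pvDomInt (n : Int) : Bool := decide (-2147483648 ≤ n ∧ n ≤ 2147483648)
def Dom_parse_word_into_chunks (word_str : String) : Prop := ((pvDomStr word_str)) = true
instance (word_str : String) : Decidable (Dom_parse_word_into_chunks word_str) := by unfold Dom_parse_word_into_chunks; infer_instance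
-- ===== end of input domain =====

-- B is an online single-pass parser (slot-pointer/run-counter state machine building
-- chunks incrementally, plus a pending-prefix DFA tokenizer) instead of A's repeated
-- five-stage chunk pipeline over an indexed glyph array; objective: faster by a
-- constant factor (measured), same O(n) asymptotics.

-- ===== PORT A =====
def GALLOWS_TRI : List (List Char) := [['c','t','h'], ['c','k','h'], ['c','p','h'], ['c','f','h']]
def GALLOWS_BI : List (List Char) := [['c','h'], ['s','h'], ['t','h'], ['k','h'], ['p','h'], ['f','h']]

-- while i < len(w): greedy tri/bi/single tokenizer of A
def evaLoopA (w : List Char) (i : Nat) (acc : List String) : List String :=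
  if _h : i < w.length then
    if i + 2 < w.length ∧ (w.drop i).take 3 ∈ GALLOWS_TRI then
      evaLoopA w (i + 3) (acc ++ [String.mk ((w.drop i).take 3)])
    else if i + 1 < w.length ∧ (w.drop i).take 2 ∈ GALLOWS_BI then
      evaLoopA w (i + 2) (acc ++ [String.mk ((w.drop i).take 2)])
    else
      evaLoopA w (i + 1) (acc ++ [String.mk [w[i]!]])
  else acc
termination_by w.length - i
decreasing_by all_goals omega

def SLOT1 : List String := ["ch", "sh", "y"]
def SLOT2_RUNS : List String := ["e"]
def SLOT2_SINGLE : List String := ["q", "a"]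
def SLOT3 : List String := ["o"]
def SLOT4_RUNS : List String := ["i"]
def SLOT4_SINGLE : List String := ["d"]
def SLOT5 : List String := ["y", "p", "f", "k", "l", "r", "s", "t", "cth", "ckh", "cph", "cfh", "n", "m"]

-- the slot-2 while loop of A (count-bounded run)
def whileRun2A (g : List String) (pos count : Nat) (chunk : List String) : List String × Nat :=
  if h : pos < g.length ∧ g[pos]! ∈ SLOT2_RUNS ∧ count < 3 then
    whileRun2A g (pos + 1) (count + 1) (chunk ++ [g[pos]!])
  else (chunk, pos)
termination_by 3 - count
decreasing_by omega

-- the slot-4 while loop of A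
def whileRun4A (g : List String) (pos count : Nat) (chunk : List String) : List String × Nat :=
  if h : pos < g.length ∧ g[pos]! ∈ SLOT4_RUNS ∧ count < 3 then
    whileRun4A g (pos + 1) (count + 1) (chunk ++ [g[pos]!])
  else (chunk, pos)
termination_by 3 - count
decreasing_by omega

-- A's five slot blocks, state = (chunk, slots_filled, pos)
def slot1A (g : List String) (st : List String × List Int × Nat) : List String × List Int × Nat :=
  if st.2.2 < g.length ∧ g[st.2.2]! ∈ SLOT1 then (st.1 ++ [g[st.2.2]!], st.2.1 ++ [1], st.2.2 + 1) else st

def slot2A (g : List String) (st : List String × List Int × Nat) : List String × List Int × Nat :=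
  if st.2.2 < g.length then
    if g[st.2.2]! ∈ SLOT2_RUNS then
      let r := whileRun2A g st.2.2 0 st.1
      (r.1, st.2.1 ++ [2], r.2)
    else if g[st.2.2]! ∈ SLOT2_SINGLE then (st.1 ++ [g[st.2.2]!], st.2.1 ++ [2], st.2.2 + 1)
    else st
  else st

def slot3A (g : List String) (st : List String × List Int × Nat) : List String × List Int × Nat :=
  if st.2.2 < g.length ∧ g[st.2.2]! ∈ SLOT3 then (st.1 ++ [g[st.2.2]!], st.2.1 ++ [3], st.2.2 + 1) else st

def slot4A (g : List String) (st : List String × List Int × Nat) : List String × List Int × Nat :=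
  if st.2.2 < g.length then
    if g[st.2.2]! ∈ SLOT4_RUNS then
      let r := whileRun4A g st.2.2 0 st.1
      (r.1, st.2.1 ++ [4], r.2)
    else if g[st.2.2]! ∈ SLOT4_SINGLE then (st.1 ++ [g[st.2.2]!], st.2.1 ++ [4], st.2.2 + 1)
    else st
  else st

def slot5A (g : List String) (st : List String × List Int × Nat) : List String × List Int × Nat :=
  if st.2.2 < g.length ∧ g[st.2.2]! ∈ SLOT5 then (st.1 ++ [g[st.2.2]!], st.2.1 ++ [5], st.2.2 + 1) else st

def parseOneChunkA (g : List String) (pos0 : Nat) : Option (List String) × Nat × List Int :=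
  let st := slot5A g (slot4A g (slot3A g (slot2A g (slot1A g ([], [], pos0)))))
  if st.2.2 = pos0 then (none, st.2.2, []) else (some st.1, st.2.2, st.2.1)

-- first while of parse_word_into_chunks; returns (chunks, unparsed, slots_per_chunk, pos)
def outerA (g : List String) (fuel pos : Nat) (chunks : List (List String)) (unparsed : List String)
    (spc : List (List Int)) : List (List String) × List String × List (List Int) × Nat :=
  match fuel with
  | 0 => (chunks, unparsed, spc, pos)  -- fuel only makes the loop total; never reached (see mainLemma)
  | fuel + 1 =>
    if pos < g.length ∧ chunks.length < 6 then
      match parseOneChunkA g pos with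
      | (none, _, _) => outerA g fuel (pos + 1) chunks (unparsed ++ [g[pos]!]) spc
      | (some c, np, s) => outerA g fuel np (chunks ++ [c]) unparsed (spc ++ [s])
    else (chunks, unparsed, spc, pos)

-- second while: drain the rest into unparsed
def drainA (g : List String) (pos : Nat) (unparsed : List String) : List String :=
  if pos < g.length then drainA g (pos + 1) (unparsed ++ [g[pos]!]) else unparsed
termination_by g.length - pos

def parse_word_into_chunks (word_str : String) : List (List String) × List String × List String × List (List Int) :=
  let glyphs := evaLoopA (PySem.Str.lower word_str).toList 0 []
  let r := outerA glyphs (glyphs.length + 1) 0 [] [] []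
  (r.1, drainA glyphs r.2.2.2 r.2.1, glyphs, r.2.2.1)

-- ===== PORT B =====
-- B's tokenizer: a DFA over single characters; buf is the pending prefix that may
-- still grow into a multi-character glyph ('', 'c', x ∈ stkpf, or 'c'+x with x ∈ tkpf)
inductive Buf
  | empty
  | c
  | single (x : Char)
  | cx (x : Char)
deriving DecidableEq, Repr

def step0 (ch : Char) : List String × Buf :=
  if ch = 'c' then ([], Buf.c)
  else if ch = 's' ∨ ch = 't' ∨ ch = 'k' ∨ ch = 'p' ∨ ch = 'f' then ([], Buf.single ch)
  else ([String.mk [ch]], Buf.empty)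

def step1 (x ch : Char) : List String × Buf :=
  if ch = 'h' then ([String.mk [x, 'h']], Buf.empty)
  else (String.mk [x] :: (step0 ch).1, (step0 ch).2)

def stepB : Buf → Char → List String × Buf
  | Buf.empty, ch => step0 ch
  | Buf.c, ch =>
    if ch = 'h' then (["ch"], Buf.empty)
    else if ch = 't' ∨ ch = 'k' ∨ ch = 'p' ∨ ch = 'f' then ([], Buf.cx ch)
    else ("c" :: (step0 ch).1, (step0 ch).2)
  | Buf.single x, ch => step1 x ch
  | Buf.cx x, ch =>
    if ch = 'h' then ([String.mk ['c', x, 'h']], Buf.empty)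
    else ("c" :: (step1 x ch).1, (step1 x ch).2)

def flushB : Buf → List String
  | Buf.empty => []
  | Buf.c => ["c"]
  | Buf.single x => [String.mk [x]]
  | Buf.cx x => ["c", String.mk [x]]

def evaB : List Char → Buf → List String
  | [], buf => flushB buf
  | ch :: rest, buf => (stepB buf ch).1 ++ evaB rest (stepB buf ch).2

-- B's glyph classifier: slot pointer p (next admissible slot), run counter rc
-- (length of the run just filled at slot p-1; 0 if none). Result: new p, new rc,
-- slot number to record (none = run continuation).
def SINGLES : List (Nat × List String) :=
  [(1, SLOT1), (2, SLOT2_SINGLE), (3, SLOT3), (4, SLOT4_SINGLE), (5, SLOT5)]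

def place (gl : String) (p rc : Nat) : Option (Nat × Nat × Option Nat) :=
  if gl = "e" ∨ gl = "i" then
    let s : Nat := if gl = "e" then 2 else 4
    if p = s + 1 ∧ 1 ≤ rc ∧ rc < 3 then some (p, rc + 1, none)
    else if p ≤ s then some (s + 1, 1, some s)
    else none
  else
    match SINGLES.find? (fun e => decide (p ≤ e.1 ∧ gl ∈ e.2)) with
    | some e => some (e.1 + 1, 0, some e.1)
    | none => none

def slotApp (slots : List Int) (so : Option Nat) : List Int :=
  match so with
  | some s => slots ++ [(s : Int)]
  | none => slots

-- B's single pass: for each glyph, place it or close the current chunk and retry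
def machineB : List String → Nat → Nat → List String → List Int →
    List (List String) → List String → List (List Int) →
    List (List String) × List String × List (List Int)
  | [], _, _, chunk, slots, C, U, S =>
    if chunk = [] then (C, U, S) else (C ++ [chunk], U, S ++ [slots])
  | gl :: r, p, rc, chunk, slots, C, U, S =>
    match place gl p rc with
    | some (p', rc', so) => machineB r p' rc' (chunk ++ [gl]) (slotApp slots so) C U S
    | none =>
      if chunk = [] then machineB r p rc chunk slots C (U ++ [gl]) S
      else if C.length + 1 = 6 then (C ++ [chunk], U ++ (gl :: r), S ++ [slots])
      else
        match place gl 1 0 with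
        | some (p', rc', so) => machineB r p' rc' [gl] (slotApp [] so) (C ++ [chunk]) U (S ++ [slots])
        | none => machineB r 1 0 [] [] (C ++ [chunk]) (U ++ [gl]) (S ++ [slots])

def parse_word_into_chunks_alt (word_str : String) : List (List String) × List String × List String × List (List Int) :=
  let glyphs := evaB (PySem.Str.lower word_str).toList Buf.empty
  let r := machineB glyphs 1 0 [] [] [] [] []
  (r.1, r.2.1, glyphs, r.2.2)

-- ===== PRECONDITION & SPEC =====
def Spec_parse_word_into_chunks (word_str : String) (out : List (List String) × List String × List String × List (List Int)) : Prop := out = parse_word_into_chunks_alt word_str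
instance (word_str : String) (out : List (List String) × List String × List String × List (List Int)) : Decidable (Spec_parse_word_into_chunks word_str out) := by unfold Spec_parse_word_into_chunks; infer_instance

-- ===== CLAIM =====
def Claim_equal_parse_word_into_chunks : Prop := ∀ (word_str : String), Dom_parse_word_into_chunks word_str → Spec_parse_word_into_chunks word_str (parse_word_into_chunks word_str)

-- ===== LEMMAS AND PROOFS =====

-- ---------- tokenizer ----------

-- index-free reformulation of A's lookahead tokenizer
def evaA' : List Char → List String
  | a :: b :: c :: r =>
    if [a, b, c] ∈ GALLOWS_TRI then String.mk [a, b, c] :: evaA' r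
    else if [a, b] ∈ GALLOWS_BI then String.mk [a, b] :: evaA' (c :: r)
    else String.mk [a] :: evaA' (b :: c :: r)
  | [a, b] => if [a, b] ∈ GALLOWS_BI then [String.mk [a, b]] else [String.mk [a], String.mk [b]]
  | [a] => [String.mk [a]]
  | [] => []

theorem tri_iff (a b c : Char) : [a, b, c] ∈ GALLOWS_TRI ↔
    (a = 'c' ∧ c = 'h' ∧ (b = 't' ∨ b = 'k' ∨ b = 'p' ∨ b = 'f')) := by
  simp [GALLOWS_TRI]; aesop

theorem bi_iff (a b : Char) : [a, b] ∈ GALLOWS_BI ↔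
    (b = 'h' ∧ (a = 'c' ∨ a = 's' ∨ a = 't' ∨ a = 'k' ∨ a = 'p' ∨ a = 'f')) := by
  simp [GALLOWS_BI]; aesop

theorem mk_c : String.mk ['c'] = "c" := by decide

theorem mk_ch : String.mk ['c', 'h'] = "ch" := by decide

theorem evaA'_one (a : Char) : evaA' [a] = [String.mk [a]] := rfl

theorem evaA'_two_no (a b : Char) (hb : [a, b] ∉ GALLOWS_BI) :
    evaA' [a, b] = [String.mk [a], String.mk [b]] := by
  simp only [evaA']; rw [if_neg hb]

theorem evaA'_two_yes (a b : Char) (hb : [a, b] ∈ GALLOWS_BI) :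
    evaA' [a, b] = [String.mk [a, b]] := by
  simp only [evaA']; rw [if_pos hb]

theorem evaA'_tri3 (a b c : Char) (r : List Char) (ht : [a, b, c] ∈ GALLOWS_TRI) :
    evaA' (a :: b :: c :: r) = String.mk [a, b, c] :: evaA' r := by
  simp only [evaA']; rw [if_pos ht]

theorem evaA'_bi3 (a b c : Char) (r : List Char) (ht : [a, b, c] ∉ GALLOWS_TRI)
    (hb : [a, b] ∈ GALLOWS_BI) :
    evaA' (a :: b :: c :: r) = String.mk [a, b] :: evaA' (c :: r) := by
  simp only [evaA']; rw [if_neg ht, if_pos hb]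

theorem evaA'_skip3 (a b c : Char) (r : List Char) (ht : [a, b, c] ∉ GALLOWS_TRI)
    (hb : [a, b] ∉ GALLOWS_BI) :
    evaA' (a :: b :: c :: r) = String.mk [a] :: evaA' (b :: c :: r) := by
  simp only [evaA']; rw [if_neg ht, if_neg hb]

theorem evaA'_single (a : Char)
    (h : ¬(a = 'c' ∨ a = 's' ∨ a = 't' ∨ a = 'k' ∨ a = 'p' ∨ a = 'f')) (r : List Char) :
    evaA' (a :: r) = String.mk [a] :: evaA' r := by
  match r with
  | [] => rfl
  | [b] => rw [evaA'_two_no a b (by rw [bi_iff]; tauto), evaA'_one]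
  | b :: c :: r' => rw [evaA'_skip3 a b c r' (by rw [tri_iff]; tauto) (by rw [bi_iff]; tauto)]

theorem evaA'_bi_any (a b : Char) (hb : [a, b] ∈ GALLOWS_BI)
    (ht : ∀ x, [a, b, x] ∉ GALLOWS_TRI) (r : List Char) :
    evaA' (a :: b :: r) = String.mk [a, b] :: evaA' r := by
  match r with
  | [] => rw [evaA'_two_yes a b hb]; rfl
  | c :: r' => rw [evaA'_bi3 a b c r' (ht c) hb]

theorem evaA'_skip_any (a b : Char) (hb : [a, b] ∉ GALLOWS_BI)
    (ht : ∀ x, [a, b, x] ∉ GALLOWS_TRI) (r : List Char) :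
    evaA' (a :: b :: r) = String.mk [a] :: evaA' (b :: r) := by
  match r with
  | [] => rw [evaA'_two_no a b hb, evaA'_one]
  | c :: r' => rw [evaA'_skip3 a b c r' (ht c) hb]

def bufChars : Buf → List Char
  | Buf.empty => []
  | Buf.c => ['c']
  | Buf.single x => [x]
  | Buf.cx x => ['c', x]

def bufWF : Buf → Prop
  | Buf.empty => True
  | Buf.c => True
  | Buf.single x => x = 's' ∨ x = 't' ∨ x = 'k' ∨ x = 'p' ∨ x = 'f'
  | Buf.cx x => x = 't' ∨ x = 'k' ∨ x = 'p' ∨ x = 'f'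

theorem step0_wf (ch : Char) : bufWF (step0 ch).2 := by
  unfold step0; split_ifs <;> simp [bufWF] <;> tauto

theorem step1_wf (x ch : Char) : bufWF (step1 x ch).2 := by
  unfold step1
  split_ifs
  · trivial
  · exact step0_wf ch

theorem stepB_wf (buf : Buf) (ch : Char) : bufWF (stepB buf ch).2 := by
  cases buf with
  | empty => exact step0_wf ch
  | c =>
    simp only [stepB]
    split_ifs with h1 h2
    · trivial
    · exact h2
    · exact step0_wf ch
  | single x => exact step1_wf x ch
  | cx x =>
    simp only [stepB]
    split_ifs
    · trivial
    · exact step1_wf x ch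

theorem key0 (ch : Char) (r : List Char) :
    evaA' (ch :: r) = (step0 ch).1 ++ evaA' (bufChars (step0 ch).2 ++ r) := by
  unfold step0
  split_ifs with h1 h2
  · subst h1; simp [bufChars]
  · simp [bufChars]
  · rw [evaA'_single ch (by tauto) r]
    simp [bufChars]

theorem key1 (x ch : Char) (hx : x = 's' ∨ x = 't' ∨ x = 'k' ∨ x = 'p' ∨ x = 'f') (r : List Char) :
    evaA' (x :: ch :: r) = (step1 x ch).1 ++ evaA' (bufChars (step1 x ch).2 ++ r) := by
  unfold step1
  split_ifs with h1
  · subst h1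
    rw [evaA'_bi_any x 'h' (by rw [bi_iff]; tauto)
      (by intro y; rw [tri_iff]; rintro ⟨hc, -, -⟩; subst hc; tauto) r]
    simp [bufChars]
  · rw [evaA'_skip_any x ch
      (by rw [bi_iff]; tauto)
      (by intro y; rw [tri_iff]; rintro ⟨hc, -, -⟩; subst hc; tauto) r]
    rw [key0 ch r]
    simp

theorem key (buf : Buf) (ch : Char) (r : List Char) (hwf : bufWF buf) :
    evaA' (bufChars buf ++ ch :: r) = (stepB buf ch).1 ++ evaA' (bufChars (stepB buf ch).2 ++ r) := by
  cases buf with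
  | empty =>
    have hb : bufChars Buf.empty ++ ch :: r = ch :: r := rfl
    rw [hb]
    exact key0 ch r
  | c =>
    rw [show bufChars Buf.c ++ ch :: r = 'c' :: ch :: r from rfl]
    simp only [stepB]
    split_ifs with h1 h2
    · subst h1
      rw [evaA'_bi_any 'c' 'h' (by rw [bi_iff]; tauto)
        (by intro y; rw [tri_iff]; rintro ⟨-, -, hb⟩; rcases hb with h|h|h|h <;> simp_all) r]
      rw [mk_ch]
      simp [bufChars]
    · simp [bufChars]
    · rw [evaA'_skip_any 'c' ch (by rw [bi_iff]; tauto)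
        (by intro y; rw [tri_iff]; rintro ⟨-, -, hb⟩; tauto) r]
      rw [mk_c, key0 ch r]
      simp
  | single x =>
    rw [show bufChars (Buf.single x) ++ ch :: r = x :: ch :: r from rfl]
    exact key1 x ch (by exact hwf) r
  | cx x =>
    have hx : x = 't' ∨ x = 'k' ∨ x = 'p' ∨ x = 'f' := hwf
    rw [show bufChars (Buf.cx x) ++ ch :: r = 'c' :: x :: ch :: r from rfl]
    simp only [stepB]
    split_ifs with h1
    · subst h1
      rw [evaA'_tri3 'c' x 'h' r (by rw [tri_iff]; tauto)]
      simp [bufChars]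
    · rw [evaA'_skip3 'c' x ch r
        (by rw [tri_iff]; rintro ⟨-, hy, -⟩; exact h1 hy)
        (by rw [bi_iff]; rintro ⟨hh, -⟩; simp_all)]
      rw [mk_c, key1 x ch (by tauto) r]
      simp

theorem evaB_eq (r : List Char) : ∀ buf, bufWF buf → evaB r buf = evaA' (bufChars buf ++ r) := by
  induction r with
  | nil =>
    intro buf hwf
    cases buf with
    | empty => rfl
    | c =>
      simp only [evaB, flushB, bufChars, List.append_nil, evaA'_one, mk_c]
    | single x => simp only [evaB, flushB, bufChars, List.append_nil, evaA'_one]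
    | cx x =>
      have hx : x = 't' ∨ x = 'k' ∨ x = 'p' ∨ x = 'f' := hwf
      simp only [evaB, flushB, bufChars, List.append_nil]
      rw [evaA'_two_no 'c' x (by rw [bi_iff]; rintro ⟨hh, -⟩; simp_all), mk_c]
  | cons ch rest ih =>
    intro buf hwf
    simp only [evaB]
    rw [ih _ (stepB_wf buf ch), ← key buf ch rest hwf]

-- A's indexed tokenizer computes evaA'
theorem evaLoopA_eq (w : List Char) : ∀ i acc, evaLoopA w i acc = acc ++ evaA' (w.drop i) := by
  intro i acc
  fun_induction evaLoopA w i acc with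
  | case1 i acc h htri ih =>
    obtain ⟨h2, ht⟩ := htri
    have e0 : w.drop i = w[i]! :: w.drop (i + 1) := by
      rw [List.drop_eq_getElem_cons (by omega), getElem!_pos w i (by omega)]
    have e1 : w.drop (i+1) = w[i+1]! :: w.drop (i + 2) := by
      rw [List.drop_eq_getElem_cons (by omega), getElem!_pos w (i+1) (by omega)]
    have e2 : w.drop (i+2) = w[i+2]! :: w.drop (i + 3) := by
      rw [List.drop_eq_getElem_cons (by omega), getElem!_pos w (i+2) (by omega)]
    have et : (w.drop i).take 3 = [w[i]!, w[i+1]!, w[i+2]!] := by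
      rw [e0, e1, e2]; rfl
    have ht' : [w[i]!, w[i+1]!, w[i+2]!] ∈ GALLOWS_TRI := by rw [← et]; exact ht
    rw [ih, et, e0, e1, e2, evaA'_tri3 _ _ _ _ ht']
    simp
  | case2 i acc h hntri hbi ih =>
    obtain ⟨h1, hb⟩ := hbi
    have e0 : w.drop i = w[i]! :: w.drop (i + 1) := by
      rw [List.drop_eq_getElem_cons (by omega), getElem!_pos w i (by omega)]
    have e1 : w.drop (i+1) = w[i+1]! :: w.drop (i + 2) := by
      rw [List.drop_eq_getElem_cons (by omega), getElem!_pos w (i+1) (by omega)]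
    have eb : (w.drop i).take 2 = [w[i]!, w[i+1]!] := by rw [e0, e1]; rfl
    have hb' : [w[i]!, w[i+1]!] ∈ GALLOWS_BI := by rw [← eb]; exact hb
    by_cases h2 : i + 2 < w.length
    · have e2 : w.drop (i+2) = w[i+2]! :: w.drop (i + 3) := by
        rw [List.drop_eq_getElem_cons (by omega), getElem!_pos w (i+2) (by omega)]
      have hnt : [w[i]!, w[i+1]!, w[i+2]!] ∉ GALLOWS_TRI := by
        intro hc
        exact hntri ⟨h2, by rw [e0, e1, e2]; exact hc⟩
      rw [ih, eb, e0, e1, e2, evaA'_bi3 _ _ _ _ hnt hb']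
      simp
    · have e2 : w.drop (i + 2) = [] := List.drop_eq_nil_of_le (by omega)
      rw [ih, eb, e0, e1, e2, evaA'_two_yes _ _ hb']
      simp [evaA']
  | case3 i acc h hntri hnbi ih =>
    have e0 : w.drop i = w[i]! :: w.drop (i + 1) := by
      rw [List.drop_eq_getElem_cons (by omega), getElem!_pos w i (by omega)]
    by_cases h1 : i + 1 < w.length
    · have e1 : w.drop (i+1) = w[i+1]! :: w.drop (i + 2) := by
        rw [List.drop_eq_getElem_cons (by omega), getElem!_pos w (i+1) (by omega)]
      have eb : (w.drop i).take 2 = [w[i]!, w[i+1]!] := by rw [e0, e1]; rfl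
      have hnb : [w[i]!, w[i+1]!] ∉ GALLOWS_BI := by
        intro hc
        exact hnbi ⟨h1, by rw [eb]; exact hc⟩
      by_cases h2 : i + 2 < w.length
      · have e2 : w.drop (i+2) = w[i+2]! :: w.drop (i + 3) := by
          rw [List.drop_eq_getElem_cons (by omega), getElem!_pos w (i+2) (by omega)]
        have hnt : [w[i]!, w[i+1]!, w[i+2]!] ∉ GALLOWS_TRI := by
          intro hc
          exact hntri ⟨h2, by rw [e0, e1, e2]; exact hc⟩
        rw [ih, e0, e1, e2, evaA'_skip3 _ _ _ _ hnt hnb]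
        simp
      · have e2 : w.drop (i + 2) = [] := List.drop_eq_nil_of_le (by omega)
        rw [ih, e0, e1, e2, evaA'_two_no _ _ hnb]
        simp [evaA']
    · have e1 : w.drop (i + 1) = [] := List.drop_eq_nil_of_le (by omega)
      rw [ih, e0, e1, evaA'_one]
      simp [evaA']
  | case4 i acc h =>
    have : w.drop i = [] := List.drop_eq_nil_of_le (by omega)
    simp [this, evaA']

theorem tokenizer_eq (w : List Char) : evaLoopA w 0 [] = evaB w Buf.empty := by
  rw [evaLoopA_eq w 0 [], evaB_eq w Buf.empty trivial]
  simp [bufChars]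

-- ---------- chunker ----------

theorem whileRun2A_le : ∀ g pos count chunk, pos ≤ (whileRun2A g pos count chunk).2 := by
  intro g pos count chunk
  fun_induction whileRun2A g pos count chunk with
  | case1 pos count chunk h ih => omega
  | case2 pos count chunk h => simp

theorem whileRun4A_le : ∀ g pos count chunk, pos ≤ (whileRun4A g pos count chunk).2 := by
  intro g pos count chunk
  fun_induction whileRun4A g pos count chunk with
  | case1 pos count chunk h ih => omega
  | case2 pos count chunk h => simp

theorem slot2A_le (g : List String) (st : List String × List Int × Nat) : st.2.2 ≤ (slot2A g st).2.2 := by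
  unfold slot2A; split_ifs <;> simp [whileRun2A_le]

theorem slot3A_le (g : List String) (st : List String × List Int × Nat) : st.2.2 ≤ (slot3A g st).2.2 := by
  unfold slot3A; split_ifs <;> simp

theorem slot4A_le (g : List String) (st : List String × List Int × Nat) : st.2.2 ≤ (slot4A g st).2.2 := by
  unfold slot4A; split_ifs <;> simp [whileRun4A_le]

theorem slot5A_le (g : List String) (st : List String × List Int × Nat) : st.2.2 ≤ (slot5A g st).2.2 := by
  unfold slot5A; split_ifs <;> simp

theorem whileRun2A_step (g : List String) (pos count : Nat) (chunk : List String)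
    (h1 : pos < g.length) (h2 : g[pos]! ∈ SLOT2_RUNS) (h3 : count < 3) :
    whileRun2A g pos count chunk = whileRun2A g (pos + 1) (count + 1) (chunk ++ [g[pos]!]) := by
  rw [whileRun2A]; rw [dif_pos ⟨h1, h2, h3⟩]

theorem whileRun2A_stop (g : List String) (pos count : Nat) (chunk : List String)
    (h : ¬(pos < g.length ∧ g[pos]! ∈ SLOT2_RUNS ∧ count < 3)) :
    whileRun2A g pos count chunk = (chunk, pos) := by
  rw [whileRun2A]; rw [dif_neg h]

theorem whileRun4A_step (g : List String) (pos count : Nat) (chunk : List String)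
    (h1 : pos < g.length) (h2 : g[pos]! ∈ SLOT4_RUNS) (h3 : count < 3) :
    whileRun4A g pos count chunk = whileRun4A g (pos + 1) (count + 1) (chunk ++ [g[pos]!]) := by
  rw [whileRun4A]; rw [dif_pos ⟨h1, h2, h3⟩]

theorem whileRun4A_stop (g : List String) (pos count : Nat) (chunk : List String)
    (h : ¬(pos < g.length ∧ g[pos]! ∈ SLOT4_RUNS ∧ count < 3)) :
    whileRun4A g pos count chunk = (chunk, pos) := by
  rw [whileRun4A]; rw [dif_neg h]

theorem drain_eq (g : List String) : ∀ pos u, drainA g pos u = u ++ g.drop pos := by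
  intro pos u
  fun_induction drainA g pos u with
  | case1 pos u h ih =>
    rw [ih]
    rw [List.drop_eq_getElem_cons h]
    simp [List.getElem?_eq_getElem h]
  | case2 pos u h =>
    have : g.drop pos = [] := List.drop_eq_nil_of_le (by omega)
    simp [this]

-- slot-stage evaluation helpers (A side)
theorem slot1A_take (g : List String) (chunk : List String) (slots : List Int) (pos : Nat)
    (h1 : pos < g.length) (h2 : g[pos]! ∈ SLOT1) :
    slot1A g (chunk, slots, pos) = (chunk ++ [g[pos]!], slots ++ [1], pos + 1) := by
  unfold slot1A; rw [if_pos ⟨h1, h2⟩]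

theorem slot1A_noop_str (g : List String) (chunk : List String) (slots : List Int) (pos : Nat)
    (h : g[pos]! ∉ SLOT1) : slot1A g (chunk, slots, pos) = (chunk, slots, pos) := by
  unfold slot1A; rw [if_neg (fun hc => h hc.2)]

theorem slot3A_take (g : List String) (chunk : List String) (slots : List Int) (pos : Nat)
    (h1 : pos < g.length) (h2 : g[pos]! ∈ SLOT3) :
    slot3A g (chunk, slots, pos) = (chunk ++ [g[pos]!], slots ++ [3], pos + 1) := by
  unfold slot3A; rw [if_pos ⟨h1, h2⟩]

theorem slot3A_noop_str (g : List String) (chunk : List String) (slots : List Int) (pos : Nat)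
    (h : g[pos]! ∉ SLOT3) : slot3A g (chunk, slots, pos) = (chunk, slots, pos) := by
  unfold slot3A; rw [if_neg (fun hc => h hc.2)]

theorem slot5A_take (g : List String) (chunk : List String) (slots : List Int) (pos : Nat)
    (h1 : pos < g.length) (h2 : g[pos]! ∈ SLOT5) :
    slot5A g (chunk, slots, pos) = (chunk ++ [g[pos]!], slots ++ [5], pos + 1) := by
  unfold slot5A; rw [if_pos ⟨h1, h2⟩]

theorem slot5A_noop_str (g : List String) (chunk : List String) (slots : List Int) (pos : Nat)
    (h : g[pos]! ∉ SLOT5) : slot5A g (chunk, slots, pos) = (chunk, slots, pos) := by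
  unfold slot5A; rw [if_neg (fun hc => h hc.2)]

theorem slot2A_run' (g : List String) (chunk : List String) (slots : List Int) (pos : Nat)
    (h1 : pos < g.length) (h2 : g[pos]! ∈ SLOT2_RUNS) :
    slot2A g (chunk, slots, pos) =
      ((whileRun2A g pos 0 chunk).1, slots ++ [2], (whileRun2A g pos 0 chunk).2) := by
  unfold slot2A; rw [if_pos h1, if_pos h2]

theorem slot2A_single' (g : List String) (chunk : List String) (slots : List Int) (pos : Nat)
    (h1 : pos < g.length) (h2 : g[pos]! ∉ SLOT2_RUNS) (h3 : g[pos]! ∈ SLOT2_SINGLE) :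
    slot2A g (chunk, slots, pos) = (chunk ++ [g[pos]!], slots ++ [2], pos + 1) := by
  unfold slot2A; rw [if_pos h1, if_neg h2, if_pos h3]

theorem slot2A_noop_str (g : List String) (chunk : List String) (slots : List Int) (pos : Nat)
    (h2 : g[pos]! ∉ SLOT2_RUNS) (h3 : g[pos]! ∉ SLOT2_SINGLE) :
    slot2A g (chunk, slots, pos) = (chunk, slots, pos) := by
  unfold slot2A
  by_cases h1 : pos < g.length
  · rw [if_pos h1, if_neg h2, if_neg h3]
  · rw [if_neg h1]

theorem slot4A_run' (g : List String) (chunk : List String) (slots : List Int) (pos : Nat)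
    (h1 : pos < g.length) (h2 : g[pos]! ∈ SLOT4_RUNS) :
    slot4A g (chunk, slots, pos) =
      ((whileRun4A g pos 0 chunk).1, slots ++ [4], (whileRun4A g pos 0 chunk).2) := by
  unfold slot4A; rw [if_pos h1, if_pos h2]

theorem slot4A_single' (g : List String) (chunk : List String) (slots : List Int) (pos : Nat)
    (h1 : pos < g.length) (h2 : g[pos]! ∉ SLOT4_RUNS) (h3 : g[pos]! ∈ SLOT4_SINGLE) :
    slot4A g (chunk, slots, pos) = (chunk ++ [g[pos]!], slots ++ [4], pos + 1) := by
  unfold slot4A; rw [if_pos h1, if_neg h2, if_pos h3]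

theorem slot4A_noop_str (g : List String) (chunk : List String) (slots : List Int) (pos : Nat)
    (h2 : g[pos]! ∉ SLOT4_RUNS) (h3 : g[pos]! ∉ SLOT4_SINGLE) :
    slot4A g (chunk, slots, pos) = (chunk, slots, pos) := by
  unfold slot4A
  by_cases h1 : pos < g.length
  · rw [if_pos h1, if_neg h2, if_neg h3]
  · rw [if_neg h1]

theorem slot2A_noop_len (g : List String) (chunk : List String) (slots : List Int) (pos : Nat)
    (h : ¬ pos < g.length) : slot2A g (chunk, slots, pos) = (chunk, slots, pos) := by
  unfold slot2A; rw [if_neg h]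

theorem slot3A_noop_len (g : List String) (chunk : List String) (slots : List Int) (pos : Nat)
    (h : ¬ pos < g.length) : slot3A g (chunk, slots, pos) = (chunk, slots, pos) := by
  unfold slot3A; rw [if_neg (fun hc => h hc.1)]

theorem slot4A_noop_len (g : List String) (chunk : List String) (slots : List Int) (pos : Nat)
    (h : ¬ pos < g.length) : slot4A g (chunk, slots, pos) = (chunk, slots, pos) := by
  unfold slot4A; rw [if_neg h]

theorem slot5A_noop_len (g : List String) (chunk : List String) (slots : List Int) (pos : Nat)
    (h : ¬ pos < g.length) : slot5A g (chunk, slots, pos) = (chunk, slots, pos) := by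
  unfold slot5A; rw [if_neg (fun hc => h hc.1)]

-- machineB stepping lemmas (B side)
theorem machineB_consume (g : List String) (pos p rc : Nat) (chunk : List String) (slots : List Int)
    (C : List (List String)) (U : List String) (S : List (List Int))
    (hp : pos < g.length) (p' rc' : Nat) (so : Option Nat)
    (hpl : place (g[pos]!) p rc = some (p', rc', so)) :
    machineB (g.drop pos) p rc chunk slots C U S =
      machineB (g.drop (pos + 1)) p' rc' (chunk ++ [g[pos]!]) (slotApp slots so) C U S := by
  rw [List.drop_eq_getElem_cons hp, ← getElem!_pos g pos hp]
  simp only [machineB, hpl]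

-- closing the current chunk at pos (or at the end of the glyph list)
def closeK (g : List String) (pos : Nat) (chunk : List String) (slots : List Int)
    (C : List (List String)) (U : List String) (S : List (List Int)) :
    List (List String) × List String × List (List Int) :=
  if pos < g.length then
    if C.length + 1 = 6 then (C ++ [chunk], U ++ g.drop pos, S ++ [slots])
    else machineB (g.drop pos) 1 0 [] [] (C ++ [chunk]) U (S ++ [slots])
  else (C ++ [chunk], U, S ++ [slots])

theorem machineB_fresh (gl : String) (r : List String) (C : List (List String)) (U : List String)
    (S : List (List Int)) :
    machineB (gl :: r) 1 0 [] [] C U S =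
      match place gl 1 0 with
      | some (p', rc', so) => machineB r p' rc' [gl] (slotApp [] so) C U S
      | none => machineB r 1 0 [] [] C (U ++ [gl]) S := by
  simp only [machineB]
  match place gl 1 0 with
  | some (p', rc', so) => simp
  | none => simp

theorem machineB_close (g : List String) (pos p rc : Nat) (chunk : List String) (slots : List Int)
    (C : List (List String)) (U : List String) (S : List (List Int))
    (hch : chunk ≠ [])
    (h : ¬ pos < g.length ∨ place (g[pos]!) p rc = none) :
    machineB (g.drop pos) p rc chunk slots C U S = closeK g pos chunk slots C U S := by
  by_cases hp : pos < g.length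
  · have hpl : place (g[pos]!) p rc = none := by tauto
    rw [List.drop_eq_getElem_cons hp, ← getElem!_pos g pos hp]
    simp only [machineB, hpl, if_neg hch]
    unfold closeK
    rw [if_pos hp]
    by_cases h6 : C.length + 1 = 6
    · rw [if_pos h6, if_pos h6]
      rw [List.drop_eq_getElem_cons hp, ← getElem!_pos g pos hp]
    · rw [if_neg h6, if_neg h6]
      rw [List.drop_eq_getElem_cons hp, ← getElem!_pos g pos hp, machineB_fresh]
  · have : g.drop pos = [] := List.drop_eq_nil_of_le (by omega)
    rw [this]
    simp only [machineB, if_neg hch]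
    unfold closeK
    rw [if_neg hp]

-- place computations
theorem place_e (p rc : Nat) : place "e" p rc =
    (if p = 3 ∧ 1 ≤ rc ∧ rc < 3 then some (p, rc + 1, none)
     else if p ≤ 2 then some (3, 1, some 2) else none) := by
  simp [place]

theorem place_i (p rc : Nat) : place "i" p rc =
    (if p = 5 ∧ 1 ≤ rc ∧ rc < 3 then some (p, rc + 1, none)
     else if p ≤ 4 then some (5, 1, some 4) else none) := by
  simp [place]

theorem place_single (gl : String) (p rc : Nat) (hne : ¬(gl = "e" ∨ gl = "i")) :
    place gl p rc =
      (if p ≤ 1 ∧ gl ∈ SLOT1 then some (2, 0, some 1)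
       else if p ≤ 2 ∧ gl ∈ SLOT2_SINGLE then some (3, 0, some 2)
       else if p ≤ 3 ∧ gl ∈ SLOT3 then some (4, 0, some 3)
       else if p ≤ 4 ∧ gl ∈ SLOT4_SINGLE then some (5, 0, some 4)
       else if p ≤ 5 ∧ gl ∈ SLOT5 then some (6, 0, some 5)
       else none) := by
  simp only [place, if_neg hne, SINGLES]
  by_cases c1 : p ≤ 1 ∧ gl ∈ SLOT1
  · rw [List.find?_cons_of_pos (by simpa using c1), if_pos c1]
  · rw [List.find?_cons_of_neg (by simpa using c1), if_neg c1]
    by_cases c2 : p ≤ 2 ∧ gl ∈ SLOT2_SINGLE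
    · rw [List.find?_cons_of_pos (by simpa using c2), if_pos c2]
    · rw [List.find?_cons_of_neg (by simpa using c2), if_neg c2]
      by_cases c3 : p ≤ 3 ∧ gl ∈ SLOT3
      · rw [List.find?_cons_of_pos (by simpa using c3), if_pos c3]
      · rw [List.find?_cons_of_neg (by simpa using c3), if_neg c3]
        by_cases c4 : p ≤ 4 ∧ gl ∈ SLOT4_SINGLE
        · rw [List.find?_cons_of_pos (by simpa using c4), if_pos c4]
        · rw [List.find?_cons_of_neg (by simpa using c4), if_neg c4]
          by_cases c5 : p ≤ 5 ∧ gl ∈ SLOT5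
          · rw [List.find?_cons_of_pos (by simpa using c5), if_pos c5]
          · rw [List.find?_cons_of_neg (by simpa using c5), if_neg c5]
            rfl

theorem place_p6 (gl : String) (rc : Nat) : place gl 6 rc = none := by
  by_cases hei : gl = "e" ∨ gl = "i"
  · rcases hei with he | he <;> subst he
    · rw [place_e, if_neg (by rintro ⟨h, -⟩; omega), if_neg (by omega)]
    · rw [place_i, if_neg (by rintro ⟨h, -⟩; omega), if_neg (by omega)]
  · rw [place_single gl 6 rc hei,
      if_neg (by rintro ⟨h, -⟩; omega), if_neg (by rintro ⟨h, -⟩; omega),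
      if_neg (by rintro ⟨h, -⟩; omega), if_neg (by rintro ⟨h, -⟩; omega),
      if_neg (by rintro ⟨h, -⟩; omega)]

-- state (6, 0): nothing places, next glyph (or the end) closes the chunk
theorem L6 (g : List String) (pos : Nat) (chunk : List String) (slots : List Int)
    (C : List (List String)) (U : List String) (S : List (List Int)) (hch : chunk ≠ []) :
    machineB (g.drop pos) 6 0 chunk slots C U S = closeK g pos chunk slots C U S :=
  machineB_close g pos 6 0 chunk slots C U S hch (Or.inr (place_p6 _ 0))

-- state (5, rc) with no run continuation possible: exactly slot 5 then close
theorem L5stop (g : List String) (pos rc : Nat) (chunk : List String) (slots : List Int)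
    (C : List (List String)) (U : List String) (S : List (List Int)) (hch : chunk ≠ [])
    (hnc : ¬(pos < g.length ∧ g[pos]! = "i" ∧ 1 ≤ rc ∧ rc < 3)) :
    machineB (g.drop pos) 5 rc chunk slots C U S =
      (let st := slot5A g (chunk, slots, pos); closeK g st.2.2 st.1 st.2.1 C U S) := by
  by_cases hp : pos < g.length
  · by_cases hei : g[pos]! = "e" ∨ g[pos]! = "i"
    · have hpl : place (g[pos]!) 5 rc = none := by
        rcases hei with he | he <;> rw [he]
        · rw [place_e, if_neg (by rintro ⟨h, -⟩; omega), if_neg (by omega)]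
        · have hno : ¬(1 ≤ rc ∧ rc < 3) := fun hr => hnc ⟨hp, he, hr.1, hr.2⟩
          rw [place_i, if_neg (by rintro ⟨-, hr⟩; exact hno hr), if_neg (by omega)]
      rw [machineB_close g pos 5 rc chunk slots C U S hch (Or.inr hpl)]
      rw [slot5A_noop_str g chunk slots pos (by rcases hei with he | he <;> rw [he] <;> decide)]
    · by_cases h5 : g[pos]! ∈ SLOT5
      · have hpl : place (g[pos]!) 5 rc = some (6, 0, some 5) := by
          rw [place_single _ _ _ hei,
            if_neg (by rintro ⟨h, -⟩; omega), if_neg (by rintro ⟨h, -⟩; omega),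
            if_neg (by rintro ⟨h, -⟩; omega), if_neg (by rintro ⟨h, -⟩; omega),
            if_pos ⟨by omega, h5⟩]
        rw [machineB_consume g pos 5 rc chunk slots C U S hp 6 0 (some 5) hpl]
        rw [L6 g (pos + 1) _ _ C U S (by simp)]
        rw [slot5A_take g chunk slots pos hp h5]
        simp [slotApp]
      · have hpl : place (g[pos]!) 5 rc = none := by
          rw [place_single _ _ _ hei,
            if_neg (by rintro ⟨h, -⟩; omega), if_neg (by rintro ⟨h, -⟩; omega),
            if_neg (by rintro ⟨h, -⟩; omega), if_neg (by rintro ⟨h, -⟩; omega),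
            if_neg (by rintro ⟨-, h⟩; exact h5 h)]
        rw [machineB_close g pos 5 rc chunk slots C U S hch (Or.inr hpl)]
        rw [slot5A_noop_str g chunk slots pos h5]
  · rw [machineB_close g pos 5 rc chunk slots C U S hch (Or.inl hp)]
    rw [slot5A_noop_len g chunk slots pos hp]


-- state (5, rc) mid-run: continue the i-run as whileRun4A, then slot 5, then close
theorem L5run (g : List String) (C : List (List String)) (U : List String) (S : List (List Int)) :
    ∀ n rc pos chunk slots, 3 - rc ≤ n → 1 ≤ rc → rc ≤ 3 → chunk ≠ [] →
    machineB (g.drop pos) 5 rc chunk slots C U S =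
      (let w := whileRun4A g pos rc chunk;
       let st := slot5A g (w.1, slots, w.2);
       closeK g st.2.2 st.1 st.2.1 C U S) := by
  intro n
  induction n with
  | zero =>
    intro rc pos chunk slots hn h1 h3 hch
    have : rc = 3 := by omega
    subst this
    rw [whileRun4A_stop g pos 3 chunk (by rintro ⟨-, -, h⟩; omega)]
    exact L5stop g pos 3 chunk slots C U S hch (by rintro ⟨-, -, -, h⟩; omega)
  | succ n ih =>
    intro rc pos chunk slots hn h1 h3 hch
    by_cases hc : pos < g.length ∧ g[pos]! = "i" ∧ rc < 3
    · obtain ⟨hp, hi, hr3⟩ := hc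
      have hpl : place (g[pos]!) 5 rc = some (5, rc + 1, none) := by
        rw [hi, place_i, if_pos ⟨rfl, h1, hr3⟩]
      rw [machineB_consume g pos 5 rc chunk slots C U S hp 5 (rc + 1) none hpl]
      rw [whileRun4A_step g pos rc chunk hp (by rw [hi]; decide) hr3]
      exact ih (rc + 1) (pos + 1) (chunk ++ [g[pos]!]) slots (by omega) (by omega) (by omega) (by simp)
    · rw [whileRun4A_stop g pos rc chunk (by
        rintro ⟨ha, hb, hcc⟩
        exact hc ⟨ha, List.eq_of_mem_singleton (show g[pos]! ∈ ["i"] from hb), hcc⟩)]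
      exact L5stop g pos rc chunk slots C U S hch (by rintro ⟨ha, hb, -, hcc⟩; exact hc ⟨ha, hb, hcc⟩)

-- state (4, 0): slot 4 then slot 5 then close
theorem L4 (g : List String) (pos : Nat) (chunk : List String) (slots : List Int)
    (C : List (List String)) (U : List String) (S : List (List Int)) (hch : chunk ≠ []) :
    machineB (g.drop pos) 4 0 chunk slots C U S =
      (let st := slot5A g (slot4A g (chunk, slots, pos)); closeK g st.2.2 st.1 st.2.1 C U S) := by
  by_cases hp : pos < g.length
  · by_cases hei : g[pos]! = "e" ∨ g[pos]! = "i"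
    · rcases hei with he | he
      · have hpl : place (g[pos]!) 4 0 = none := by
          rw [he, place_e, if_neg (by rintro ⟨h, -⟩; omega), if_neg (by omega)]
        rw [machineB_close g pos 4 0 chunk slots C U S hch (Or.inr hpl)]
        rw [slot4A_noop_str g chunk slots pos (by rw [he]; decide) (by rw [he]; decide)]
        rw [slot5A_noop_str g chunk slots pos (by rw [he]; decide)]
      · have hpl : place (g[pos]!) 4 0 = some (5, 1, some 4) := by
          rw [he, place_i, if_neg (by rintro ⟨-, h, -⟩; omega), if_pos (by omega)]
        rw [machineB_consume g pos 4 0 chunk slots C U S hp 5 1 (some 4) hpl]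
        rw [L5run g C U S 2 1 (pos + 1) (chunk ++ [g[pos]!]) (slotApp slots (some 4))
          (by omega) (by omega) (by omega) (by simp)]
        rw [slot4A_run' g chunk slots pos hp (by rw [he]; decide)]
        rw [whileRun4A_step g pos 0 chunk hp (by rw [he]; decide) (by omega)]
        simp [slotApp]
    · have hni4 : g[pos]! ∉ SLOT4_RUNS := fun hcc =>
        hei (Or.inr (List.eq_of_mem_singleton (show g[pos]! ∈ ["i"] from hcc)))
      by_cases h4 : g[pos]! ∈ SLOT4_SINGLE
      · have hpl : place (g[pos]!) 4 0 = some (5, 0, some 4) := by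
          rw [place_single _ _ _ hei,
            if_neg (by rintro ⟨h, -⟩; omega), if_neg (by rintro ⟨h, -⟩; omega),
            if_neg (by rintro ⟨h, -⟩; omega), if_pos ⟨by omega, h4⟩]
        rw [machineB_consume g pos 4 0 chunk slots C U S hp 5 0 (some 4) hpl]
        rw [L5stop g (pos + 1) 0 _ _ C U S (by simp) (by rintro ⟨-, -, h, -⟩; omega)]
        rw [slot4A_single' g chunk slots pos hp hni4 h4]
        simp [slotApp]
      · have hn4A : slot4A g (chunk, slots, pos) = (chunk, slots, pos) :=
          slot4A_noop_str g chunk slots pos hni4 h4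
        by_cases h5 : g[pos]! ∈ SLOT5
        · have hpl : place (g[pos]!) 4 0 = some (6, 0, some 5) := by
            rw [place_single _ _ _ hei,
              if_neg (by rintro ⟨h, -⟩; omega), if_neg (by rintro ⟨h, -⟩; omega),
              if_neg (by rintro ⟨h, -⟩; omega), if_neg (by rintro ⟨-, h⟩; exact h4 h),
              if_pos ⟨by omega, h5⟩]
          rw [machineB_consume g pos 4 0 chunk slots C U S hp 6 0 (some 5) hpl]
          rw [L6 g (pos + 1) _ _ C U S (by simp)]
          rw [hn4A, slot5A_take g chunk slots pos hp h5]
          simp [slotApp]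
        · have hpl : place (g[pos]!) 4 0 = none := by
            rw [place_single _ _ _ hei,
              if_neg (by rintro ⟨h, -⟩; omega), if_neg (by rintro ⟨h, -⟩; omega),
              if_neg (by rintro ⟨h, -⟩; omega), if_neg (by rintro ⟨-, h⟩; exact h4 h),
              if_neg (by rintro ⟨-, h⟩; exact h5 h)]
          rw [machineB_close g pos 4 0 chunk slots C U S hch (Or.inr hpl)]
          rw [hn4A, slot5A_noop_str g chunk slots pos h5]
  · rw [machineB_close g pos 4 0 chunk slots C U S hch (Or.inl hp)]
    rw [slot4A_noop_len g chunk slots pos hp, slot5A_noop_len g chunk slots pos hp]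

-- state (3, rc) with no e-run continuation possible: slots 3,4,5 then close
theorem L3stop (g : List String) (pos rc : Nat) (chunk : List String) (slots : List Int)
    (C : List (List String)) (U : List String) (S : List (List Int)) (hch : chunk ≠ [])
    (hnc : ¬(pos < g.length ∧ g[pos]! = "e" ∧ 1 ≤ rc ∧ rc < 3)) :
    machineB (g.drop pos) 3 rc chunk slots C U S =
      (let st := slot5A g (slot4A g (slot3A g (chunk, slots, pos)));
       closeK g st.2.2 st.1 st.2.1 C U S) := by
  by_cases hp : pos < g.length
  · by_cases hei : g[pos]! = "e" ∨ g[pos]! = "i"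
    · rcases hei with he | he
      · have hno : ¬(1 ≤ rc ∧ rc < 3) := fun hr => hnc ⟨hp, he, hr.1, hr.2⟩
        have hpl : place (g[pos]!) 3 rc = none := by
          rw [he, place_e, if_neg (by rintro ⟨-, hr⟩; exact hno hr), if_neg (by omega)]
        rw [machineB_close g pos 3 rc chunk slots C U S hch (Or.inr hpl)]
        rw [slot3A_noop_str g chunk slots pos (by rw [he]; decide)]
        rw [slot4A_noop_str g chunk slots pos (by rw [he]; decide) (by rw [he]; decide)]
        rw [slot5A_noop_str g chunk slots pos (by rw [he]; decide)]
      · have hpl : place (g[pos]!) 3 rc = some (5, 1, some 4) := by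
          rw [he, place_i, if_neg (by rintro ⟨h, -⟩; omega), if_pos (by omega)]
        rw [machineB_consume g pos 3 rc chunk slots C U S hp 5 1 (some 4) hpl]
        rw [L5run g C U S 2 1 (pos + 1) (chunk ++ [g[pos]!]) (slotApp slots (some 4))
          (by omega) (by omega) (by omega) (by simp)]
        rw [slot3A_noop_str g chunk slots pos (by rw [he]; decide)]
        rw [slot4A_run' g chunk slots pos hp (by rw [he]; decide)]
        rw [whileRun4A_step g pos 0 chunk hp (by rw [he]; decide) (by omega)]
        simp [slotApp]
    · have hni4 : g[pos]! ∉ SLOT4_RUNS := fun hcc =>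
        hei (Or.inr (List.eq_of_mem_singleton (show g[pos]! ∈ ["i"] from hcc)))
      by_cases h3 : g[pos]! ∈ SLOT3
      · have hpl : place (g[pos]!) 3 rc = some (4, 0, some 3) := by
          rw [place_single _ _ _ hei,
            if_neg (by rintro ⟨h, -⟩; omega), if_neg (by rintro ⟨h, -⟩; omega),
            if_pos ⟨by omega, h3⟩]
        rw [machineB_consume g pos 3 rc chunk slots C U S hp 4 0 (some 3) hpl]
        rw [L4 g (pos + 1) _ _ C U S (by simp)]
        rw [slot3A_take g chunk slots pos hp h3]
        simp [slotApp]
      · have hn3A : slot3A g (chunk, slots, pos) = (chunk, slots, pos) :=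
          slot3A_noop_str g chunk slots pos h3
        by_cases h4 : g[pos]! ∈ SLOT4_SINGLE
        · have hpl : place (g[pos]!) 3 rc = some (5, 0, some 4) := by
            rw [place_single _ _ _ hei,
              if_neg (by rintro ⟨h, -⟩; omega), if_neg (by rintro ⟨h, -⟩; omega),
              if_neg (by rintro ⟨-, h⟩; exact h3 h), if_pos ⟨by omega, h4⟩]
          rw [machineB_consume g pos 3 rc chunk slots C U S hp 5 0 (some 4) hpl]
          rw [L5stop g (pos + 1) 0 _ _ C U S (by simp) (by rintro ⟨-, -, h, -⟩; omega)]
          rw [hn3A, slot4A_single' g chunk slots pos hp hni4 h4]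
          simp [slotApp]
        · have hn4A : slot4A g (chunk, slots, pos) = (chunk, slots, pos) :=
            slot4A_noop_str g chunk slots pos hni4 h4
          by_cases h5 : g[pos]! ∈ SLOT5
          · have hpl : place (g[pos]!) 3 rc = some (6, 0, some 5) := by
              rw [place_single _ _ _ hei,
                if_neg (by rintro ⟨h, -⟩; omega), if_neg (by rintro ⟨h, -⟩; omega),
                if_neg (by rintro ⟨-, h⟩; exact h3 h), if_neg (by rintro ⟨-, h⟩; exact h4 h),
                if_pos ⟨by omega, h5⟩]
            rw [machineB_consume g pos 3 rc chunk slots C U S hp 6 0 (some 5) hpl]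
            rw [L6 g (pos + 1) _ _ C U S (by simp)]
            rw [hn3A, hn4A, slot5A_take g chunk slots pos hp h5]
            simp [slotApp]
          · have hpl : place (g[pos]!) 3 rc = none := by
              rw [place_single _ _ _ hei,
                if_neg (by rintro ⟨h, -⟩; omega), if_neg (by rintro ⟨h, -⟩; omega),
                if_neg (by rintro ⟨-, h⟩; exact h3 h), if_neg (by rintro ⟨-, h⟩; exact h4 h),
                if_neg (by rintro ⟨-, h⟩; exact h5 h)]
            rw [machineB_close g pos 3 rc chunk slots C U S hch (Or.inr hpl)]
            rw [hn3A, hn4A, slot5A_noop_str g chunk slots pos h5]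
  · rw [machineB_close g pos 3 rc chunk slots C U S hch (Or.inl hp)]
    rw [slot3A_noop_len g chunk slots pos hp, slot4A_noop_len g chunk slots pos hp,
      slot5A_noop_len g chunk slots pos hp]

-- state (3, rc) mid e-run: continue the run as whileRun2A, then slots 3,4,5, then close
theorem L3run (g : List String) (C : List (List String)) (U : List String) (S : List (List Int)) :
    ∀ n rc pos chunk slots, 3 - rc ≤ n → 1 ≤ rc → rc ≤ 3 → chunk ≠ [] →
    machineB (g.drop pos) 3 rc chunk slots C U S =
      (let w := whileRun2A g pos rc chunk;
       let st := slot5A g (slot4A g (slot3A g (w.1, slots, w.2)));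
       closeK g st.2.2 st.1 st.2.1 C U S) := by
  intro n
  induction n with
  | zero =>
    intro rc pos chunk slots hn h1 h3 hch
    have : rc = 3 := by omega
    subst this
    rw [whileRun2A_stop g pos 3 chunk (by rintro ⟨-, -, h⟩; omega)]
    exact L3stop g pos 3 chunk slots C U S hch (by rintro ⟨-, -, -, h⟩; omega)
  | succ n ih =>
    intro rc pos chunk slots hn h1 h3 hch
    by_cases hc : pos < g.length ∧ g[pos]! = "e" ∧ rc < 3
    · obtain ⟨hp, he, hr3⟩ := hc
      have hpl : place (g[pos]!) 3 rc = some (3, rc + 1, none) := by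
        rw [he, place_e, if_pos ⟨rfl, h1, hr3⟩]
      rw [machineB_consume g pos 3 rc chunk slots C U S hp 3 (rc + 1) none hpl]
      rw [whileRun2A_step g pos rc chunk hp (by rw [he]; decide) hr3]
      exact ih (rc + 1) (pos + 1) (chunk ++ [g[pos]!]) slots (by omega) (by omega) (by omega) (by simp)
    · rw [whileRun2A_stop g pos rc chunk (by
        rintro ⟨ha, hb, hcc⟩
        exact hc ⟨ha, List.eq_of_mem_singleton (show g[pos]! ∈ ["e"] from hb), hcc⟩)]
      exact L3stop g pos rc chunk slots C U S hch (by rintro ⟨ha, hb, -, hcc⟩; exact hc ⟨ha, hb, hcc⟩)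

-- state (2, 0): slots 2,3,4,5 then close
theorem L2 (g : List String) (pos : Nat) (chunk : List String) (slots : List Int)
    (C : List (List String)) (U : List String) (S : List (List Int)) (hch : chunk ≠ []) :
    machineB (g.drop pos) 2 0 chunk slots C U S =
      (let st := slot5A g (slot4A g (slot3A g (slot2A g (chunk, slots, pos))));
       closeK g st.2.2 st.1 st.2.1 C U S) := by
  by_cases hp : pos < g.length
  · by_cases hei : g[pos]! = "e" ∨ g[pos]! = "i"
    · rcases hei with he | he
      · have hpl : place (g[pos]!) 2 0 = some (3, 1, some 2) := by
          rw [he, place_e, if_neg (by rintro ⟨h, -⟩; omega), if_pos (by omega)]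
        rw [machineB_consume g pos 2 0 chunk slots C U S hp 3 1 (some 2) hpl]
        rw [L3run g C U S 2 1 (pos + 1) (chunk ++ [g[pos]!]) (slotApp slots (some 2))
          (by omega) (by omega) (by omega) (by simp)]
        rw [slot2A_run' g chunk slots pos hp (by rw [he]; decide)]
        rw [whileRun2A_step g pos 0 chunk hp (by rw [he]; decide) (by omega)]
        simp [slotApp]
      · have hpl : place (g[pos]!) 2 0 = some (5, 1, some 4) := by
          rw [he, place_i, if_neg (by rintro ⟨h, -⟩; omega), if_pos (by omega)]
        rw [machineB_consume g pos 2 0 chunk slots C U S hp 5 1 (some 4) hpl]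
        rw [L5run g C U S 2 1 (pos + 1) (chunk ++ [g[pos]!]) (slotApp slots (some 4))
          (by omega) (by omega) (by omega) (by simp)]
        rw [slot2A_noop_str g chunk slots pos (by rw [he]; decide) (by rw [he]; decide)]
        rw [slot3A_noop_str g chunk slots pos (by rw [he]; decide)]
        rw [slot4A_run' g chunk slots pos hp (by rw [he]; decide)]
        rw [whileRun4A_step g pos 0 chunk hp (by rw [he]; decide) (by omega)]
        simp [slotApp]
    · have hne2 : g[pos]! ∉ SLOT2_RUNS := fun hcc =>
        hei (Or.inl (List.eq_of_mem_singleton (show g[pos]! ∈ ["e"] from hcc)))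
      have hni4 : g[pos]! ∉ SLOT4_RUNS := fun hcc =>
        hei (Or.inr (List.eq_of_mem_singleton (show g[pos]! ∈ ["i"] from hcc)))
      by_cases h2 : g[pos]! ∈ SLOT2_SINGLE
      · have hpl : place (g[pos]!) 2 0 = some (3, 0, some 2) := by
          rw [place_single _ _ _ hei,
            if_neg (by rintro ⟨h, -⟩; omega), if_pos ⟨by omega, h2⟩]
        rw [machineB_consume g pos 2 0 chunk slots C U S hp 3 0 (some 2) hpl]
        rw [L3stop g (pos + 1) 0 _ _ C U S (by simp) (by rintro ⟨-, -, h, -⟩; omega)]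
        rw [slot2A_single' g chunk slots pos hp hne2 h2]
        simp [slotApp]
      · have hn2A : slot2A g (chunk, slots, pos) = (chunk, slots, pos) :=
          slot2A_noop_str g chunk slots pos hne2 h2
        by_cases h3 : g[pos]! ∈ SLOT3
        · have hpl : place (g[pos]!) 2 0 = some (4, 0, some 3) := by
            rw [place_single _ _ _ hei,
              if_neg (by rintro ⟨h, -⟩; omega), if_neg (by rintro ⟨-, h⟩; exact h2 h),
              if_pos ⟨by omega, h3⟩]
          rw [machineB_consume g pos 2 0 chunk slots C U S hp 4 0 (some 3) hpl]
          rw [L4 g (pos + 1) _ _ C U S (by simp)]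
          rw [hn2A, slot3A_take g chunk slots pos hp h3]
          simp [slotApp]
        · have hn3A : slot3A g (chunk, slots, pos) = (chunk, slots, pos) :=
            slot3A_noop_str g chunk slots pos h3
          by_cases h4 : g[pos]! ∈ SLOT4_SINGLE
          · have hpl : place (g[pos]!) 2 0 = some (5, 0, some 4) := by
              rw [place_single _ _ _ hei,
                if_neg (by rintro ⟨h, -⟩; omega), if_neg (by rintro ⟨-, h⟩; exact h2 h),
                if_neg (by rintro ⟨-, h⟩; exact h3 h), if_pos ⟨by omega, h4⟩]
            rw [machineB_consume g pos 2 0 chunk slots C U S hp 5 0 (some 4) hpl]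
            rw [L5stop g (pos + 1) 0 _ _ C U S (by simp) (by rintro ⟨-, -, h, -⟩; omega)]
            rw [hn2A, hn3A, slot4A_single' g chunk slots pos hp hni4 h4]
            simp [slotApp]
          · have hn4A : slot4A g (chunk, slots, pos) = (chunk, slots, pos) :=
              slot4A_noop_str g chunk slots pos hni4 h4
            by_cases h5 : g[pos]! ∈ SLOT5
            · have hpl : place (g[pos]!) 2 0 = some (6, 0, some 5) := by
                rw [place_single _ _ _ hei,
                  if_neg (by rintro ⟨h, -⟩; omega), if_neg (by rintro ⟨-, h⟩; exact h2 h),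
                  if_neg (by rintro ⟨-, h⟩; exact h3 h), if_neg (by rintro ⟨-, h⟩; exact h4 h),
                  if_pos ⟨by omega, h5⟩]
              rw [machineB_consume g pos 2 0 chunk slots C U S hp 6 0 (some 5) hpl]
              rw [L6 g (pos + 1) _ _ C U S (by simp)]
              rw [hn2A, hn3A, hn4A, slot5A_take g chunk slots pos hp h5]
              simp [slotApp]
            · have hpl : place (g[pos]!) 2 0 = none := by
                rw [place_single _ _ _ hei,
                  if_neg (by rintro ⟨h, -⟩; omega), if_neg (by rintro ⟨-, h⟩; exact h2 h),
                  if_neg (by rintro ⟨-, h⟩; exact h3 h), if_neg (by rintro ⟨-, h⟩; exact h4 h),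
                  if_neg (by rintro ⟨-, h⟩; exact h5 h)]
              rw [machineB_close g pos 2 0 chunk slots C U S hch (Or.inr hpl)]
              rw [hn2A, hn3A, hn4A, slot5A_noop_str g chunk slots pos h5]
  · rw [machineB_close g pos 2 0 chunk slots C U S hch (Or.inl hp)]
    rw [slot2A_noop_len g chunk slots pos hp, slot3A_noop_len g chunk slots pos hp,
      slot4A_noop_len g chunk slots pos hp, slot5A_noop_len g chunk slots pos hp]

-- the full pipeline of A (used only to state the simulation)
def pipeA (g : List String) (pos : Nat) : List String × List Int × Nat :=
  slot5A g (slot4A g (slot3A g (slot2A g (slot1A g ([], [], pos)))))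

-- some-chunk simulation from the fresh state, with progress
theorem SIM (g : List String) (pos : Nat) (C : List (List String)) (U : List String)
    (S : List (List Int)) (hp : pos < g.length) (t : Nat × Nat × Option Nat)
    (hpl : place (g[pos]!) 1 0 = some t) :
    machineB (g.drop pos) 1 0 [] [] C U S =
      closeK g (pipeA g pos).2.2 (pipeA g pos).1 (pipeA g pos).2.1 C U S ∧
    pos < (pipeA g pos).2.2 := by
  unfold pipeA
  by_cases hei : g[pos]! = "e" ∨ g[pos]! = "i"
  · rcases hei with he | he
    · have hpl2 : place (g[pos]!) 1 0 = some (3, 1, some 2) := by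
        rw [he, place_e, if_neg (by rintro ⟨h, -⟩; omega), if_pos (by omega)]
      have hs1 : slot1A g (([] : List String), ([] : List Int), pos) = ([], [], pos) :=
        slot1A_noop_str g [] [] pos (by rw [he]; decide)
      have hs2 : slot2A g (([] : List String), ([] : List Int), pos) =
          ((whileRun2A g pos 0 []).1, [(2 : Int)], (whileRun2A g pos 0 []).2) := by
        rw [slot2A_run' g [] [] pos hp (by rw [he]; decide), List.nil_append]
      have hw : whileRun2A g pos 0 [] = whileRun2A g (pos + 1) 1 [g[pos]!] := by
        rw [whileRun2A_step g pos 0 [] hp (by rw [he]; decide) (by omega)]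
        rw [List.nil_append]
      constructor
      · rw [machineB_consume g pos 1 0 [] [] C U S hp 3 1 (some 2) hpl2]
        rw [List.nil_append]
        rw [L3run g C U S 2 1 (pos + 1) [g[pos]!] (slotApp [] (some 2))
          (by omega) (by omega) (by omega) (by simp)]
        rw [hs1, hs2, hw]
        simp [slotApp]
      · rw [hs1, hs2, hw]
        have h1 := whileRun2A_le g (pos + 1) 1 [g[pos]!]
        have h2 := slot3A_le g ((whileRun2A g (pos + 1) 1 [g[pos]!]).1, [(2 : Int)], (whileRun2A g (pos + 1) 1 [g[pos]!]).2)
        have h3 := slot4A_le g (slot3A g ((whileRun2A g (pos + 1) 1 [g[pos]!]).1, [(2 : Int)], (whileRun2A g (pos + 1) 1 [g[pos]!]).2))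
        have h4 := slot5A_le g (slot4A g (slot3A g ((whileRun2A g (pos + 1) 1 [g[pos]!]).1, [(2 : Int)], (whileRun2A g (pos + 1) 1 [g[pos]!]).2)))
        simp only at h1 h2 h3 h4 ⊢
        omega
    · have hpl2 : place (g[pos]!) 1 0 = some (5, 1, some 4) := by
        rw [he, place_i, if_neg (by rintro ⟨h, -⟩; omega), if_pos (by omega)]
      have hs1 : slot1A g (([] : List String), ([] : List Int), pos) = ([], [], pos) :=
        slot1A_noop_str g [] [] pos (by rw [he]; decide)
      have hs2 : slot2A g (([] : List String), ([] : List Int), pos) = ([], [], pos) :=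
        slot2A_noop_str g [] [] pos (by rw [he]; decide) (by rw [he]; decide)
      have hs3 : slot3A g (([] : List String), ([] : List Int), pos) = ([], [], pos) :=
        slot3A_noop_str g [] [] pos (by rw [he]; decide)
      have hs4 : slot4A g (([] : List String), ([] : List Int), pos) =
          ((whileRun4A g pos 0 []).1, [(4 : Int)], (whileRun4A g pos 0 []).2) := by
        rw [slot4A_run' g [] [] pos hp (by rw [he]; decide), List.nil_append]
      have hw : whileRun4A g pos 0 [] = whileRun4A g (pos + 1) 1 [g[pos]!] := by
        rw [whileRun4A_step g pos 0 [] hp (by rw [he]; decide) (by omega)]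
        rw [List.nil_append]
      constructor
      · rw [machineB_consume g pos 1 0 [] [] C U S hp 5 1 (some 4) hpl2]
        rw [List.nil_append]
        rw [L5run g C U S 2 1 (pos + 1) [g[pos]!] (slotApp [] (some 4))
          (by omega) (by omega) (by omega) (by simp)]
        rw [hs1, hs2, hs3, hs4, hw]
        simp [slotApp]
      · rw [hs1, hs2, hs3, hs4, hw]
        have h1 := whileRun4A_le g (pos + 1) 1 [g[pos]!]
        have h4 := slot5A_le g ((whileRun4A g (pos + 1) 1 [g[pos]!]).1, [(4 : Int)], (whileRun4A g (pos + 1) 1 [g[pos]!]).2)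
        simp only at h1 h4 ⊢
        omega
  · have hne2 : g[pos]! ∉ SLOT2_RUNS := fun hcc =>
      hei (Or.inl (List.eq_of_mem_singleton (show g[pos]! ∈ ["e"] from hcc)))
    have hni4 : g[pos]! ∉ SLOT4_RUNS := fun hcc =>
      hei (Or.inr (List.eq_of_mem_singleton (show g[pos]! ∈ ["i"] from hcc)))
    by_cases h1 : g[pos]! ∈ SLOT1
    · have hs1 : slot1A g (([] : List String), ([] : List Int), pos) = ([g[pos]!], [(1 : Int)], pos + 1) := by
        rw [slot1A_take g [] [] pos hp h1]
        rw [List.nil_append, List.nil_append]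
      have hpl2 : place (g[pos]!) 1 0 = some (2, 0, some 1) := by
        rw [place_single _ _ _ hei, if_pos ⟨by omega, h1⟩]
      constructor
      · rw [machineB_consume g pos 1 0 [] [] C U S hp 2 0 (some 1) hpl2]
        rw [List.nil_append]
        rw [L2 g (pos + 1) _ _ C U S (by simp)]
        rw [hs1]
        simp [slotApp]
      · rw [hs1]
        have h2 := slot2A_le g (([g[pos]!], [(1 : Int)], pos + 1))
        have h3 := slot3A_le g (slot2A g ([g[pos]!], [(1 : Int)], pos + 1))
        have h4 := slot4A_le g (slot3A g (slot2A g ([g[pos]!], [(1 : Int)], pos + 1)))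
        have h5 := slot5A_le g (slot4A g (slot3A g (slot2A g ([g[pos]!], [(1 : Int)], pos + 1))))
        simp only at h2 h3 h4 h5 ⊢
        omega
    · have hs1 : slot1A g (([] : List String), ([] : List Int), pos) = ([], [], pos) :=
        slot1A_noop_str g [] [] pos h1
      by_cases h2 : g[pos]! ∈ SLOT2_SINGLE
      · have hpl2 : place (g[pos]!) 1 0 = some (3, 0, some 2) := by
          rw [place_single _ _ _ hei, if_neg (by rintro ⟨-, h⟩; exact h1 h),
            if_pos ⟨by omega, h2⟩]
        have hs2 : slot2A g (([] : List String), ([] : List Int), pos) = ([g[pos]!], [(2 : Int)], pos + 1) := by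
          rw [slot2A_single' g [] [] pos hp hne2 h2]
          rw [List.nil_append, List.nil_append]
        constructor
        · rw [machineB_consume g pos 1 0 [] [] C U S hp 3 0 (some 2) hpl2]
          rw [List.nil_append]
          rw [L3stop g (pos + 1) 0 _ _ C U S (by simp) (by rintro ⟨-, -, h, -⟩; omega)]
          rw [hs1, hs2]
          simp [slotApp]
        · rw [hs1, hs2]
          have h3 := slot3A_le g (([g[pos]!], [(2 : Int)], pos + 1))
          have h4 := slot4A_le g (slot3A g ([g[pos]!], [(2 : Int)], pos + 1))
          have h5 := slot5A_le g (slot4A g (slot3A g ([g[pos]!], [(2 : Int)], pos + 1)))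
          simp only at h3 h4 h5 ⊢
          omega
      · have hs2 : slot2A g (([] : List String), ([] : List Int), pos) = ([], [], pos) :=
          slot2A_noop_str g [] [] pos hne2 h2
        by_cases h3 : g[pos]! ∈ SLOT3
        · have hpl2 : place (g[pos]!) 1 0 = some (4, 0, some 3) := by
            rw [place_single _ _ _ hei, if_neg (by rintro ⟨-, h⟩; exact h1 h),
              if_neg (by rintro ⟨-, h⟩; exact h2 h), if_pos ⟨by omega, h3⟩]
          have hs3 : slot3A g (([] : List String), ([] : List Int), pos) = ([g[pos]!], [(3 : Int)], pos + 1) := by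
            rw [slot3A_take g [] [] pos hp h3]
            rw [List.nil_append, List.nil_append]
          constructor
          · rw [machineB_consume g pos 1 0 [] [] C U S hp 4 0 (some 3) hpl2]
            rw [List.nil_append]
            rw [L4 g (pos + 1) _ _ C U S (by simp)]
            rw [hs1, hs2, hs3]
            simp [slotApp]
          · rw [hs1, hs2, hs3]
            have h4 := slot4A_le g (([g[pos]!], [(3 : Int)], pos + 1))
            have h5 := slot5A_le g (slot4A g ([g[pos]!], [(3 : Int)], pos + 1))
            simp only at h4 h5 ⊢
            omega
        · have hs3 : slot3A g (([] : List String), ([] : List Int), pos) = ([], [], pos) :=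
            slot3A_noop_str g [] [] pos h3
          by_cases h4 : g[pos]! ∈ SLOT4_SINGLE
          · have hpl2 : place (g[pos]!) 1 0 = some (5, 0, some 4) := by
              rw [place_single _ _ _ hei, if_neg (by rintro ⟨-, h⟩; exact h1 h),
                if_neg (by rintro ⟨-, h⟩; exact h2 h), if_neg (by rintro ⟨-, h⟩; exact h3 h),
                if_pos ⟨by omega, h4⟩]
            have hs4 : slot4A g (([] : List String), ([] : List Int), pos) = ([g[pos]!], [(4 : Int)], pos + 1) := by
              rw [slot4A_single' g [] [] pos hp hni4 h4]
              rw [List.nil_append, List.nil_append]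
            constructor
            · rw [machineB_consume g pos 1 0 [] [] C U S hp 5 0 (some 4) hpl2]
              rw [List.nil_append]
              rw [L5stop g (pos + 1) 0 _ _ C U S (by simp) (by rintro ⟨-, -, h, -⟩; omega)]
              rw [hs1, hs2, hs3, hs4]
              simp [slotApp]
            · rw [hs1, hs2, hs3, hs4]
              have h5 := slot5A_le g (([g[pos]!], [(4 : Int)], pos + 1))
              simp only at h5 ⊢
              omega
          · have hs4 : slot4A g (([] : List String), ([] : List Int), pos) = ([], [], pos) :=
              slot4A_noop_str g [] [] pos hni4 h4
            by_cases h5 : g[pos]! ∈ SLOT5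
            · have hpl2 : place (g[pos]!) 1 0 = some (6, 0, some 5) := by
                rw [place_single _ _ _ hei, if_neg (by rintro ⟨-, h⟩; exact h1 h),
                  if_neg (by rintro ⟨-, h⟩; exact h2 h), if_neg (by rintro ⟨-, h⟩; exact h3 h),
                  if_neg (by rintro ⟨-, h⟩; exact h4 h), if_pos ⟨by omega, h5⟩]
              have hs5 : slot5A g (([] : List String), ([] : List Int), pos) = ([g[pos]!], [(5 : Int)], pos + 1) := by
                rw [slot5A_take g [] [] pos hp h5]
                rw [List.nil_append, List.nil_append]
              constructor
              · rw [machineB_consume g pos 1 0 [] [] C U S hp 6 0 (some 5) hpl2]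
                rw [List.nil_append]
                rw [L6 g (pos + 1) _ _ C U S (by simp)]
                rw [hs1, hs2, hs3, hs4, hs5]
                simp [slotApp]
              · rw [hs1, hs2, hs3, hs4, hs5]
                exact Nat.lt_succ_self pos
            · exfalso
              rw [place_single _ _ _ hei, if_neg (by rintro ⟨-, h⟩; exact h1 h),
                if_neg (by rintro ⟨-, h⟩; exact h2 h), if_neg (by rintro ⟨-, h⟩; exact h3 h),
                if_neg (by rintro ⟨-, h⟩; exact h4 h), if_neg (by rintro ⟨-, h⟩; exact h5 h)] at hpl
              cases hpl

-- fresh-state failure: no slot consumes, parse_one_chunk returns None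
theorem pipe_none (g : List String) (pos : Nat) (hp : pos < g.length)
    (hpl : place (g[pos]!) 1 0 = none) : parseOneChunkA g pos = (none, pos, []) := by
  have hei : ¬(g[pos]! = "e" ∨ g[pos]! = "i") := by
    rintro (he | he)
    · rw [he, place_e, if_neg (by rintro ⟨h, -⟩; omega), if_pos (by omega)] at hpl
      cases hpl
    · rw [he, place_i, if_neg (by rintro ⟨h, -⟩; omega), if_pos (by omega)] at hpl
      cases hpl
  rw [place_single _ _ _ hei] at hpl
  have hne2 : g[pos]! ∉ SLOT2_RUNS := fun hcc =>
    hei (Or.inl (List.eq_of_mem_singleton (show g[pos]! ∈ ["e"] from hcc)))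
  have hni4 : g[pos]! ∉ SLOT4_RUNS := fun hcc =>
    hei (Or.inr (List.eq_of_mem_singleton (show g[pos]! ∈ ["i"] from hcc)))
  by_cases h1 : g[pos]! ∈ SLOT1
  · rw [if_pos ⟨by omega, h1⟩] at hpl; cases hpl
  rw [if_neg (by rintro ⟨-, h⟩; exact h1 h)] at hpl
  by_cases h2 : g[pos]! ∈ SLOT2_SINGLE
  · rw [if_pos ⟨by omega, h2⟩] at hpl; cases hpl
  rw [if_neg (by rintro ⟨-, h⟩; exact h2 h)] at hpl
  by_cases h3 : g[pos]! ∈ SLOT3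
  · rw [if_pos ⟨by omega, h3⟩] at hpl; cases hpl
  rw [if_neg (by rintro ⟨-, h⟩; exact h3 h)] at hpl
  by_cases h4 : g[pos]! ∈ SLOT4_SINGLE
  · rw [if_pos ⟨by omega, h4⟩] at hpl; cases hpl
  rw [if_neg (by rintro ⟨-, h⟩; exact h4 h)] at hpl
  by_cases h5 : g[pos]! ∈ SLOT5
  · rw [if_pos ⟨by omega, h5⟩] at hpl; cases hpl
  unfold parseOneChunkA
  rw [slot1A_noop_str g [] [] pos h1, slot2A_noop_str g [] [] pos hne2 h2,
    slot3A_noop_str g [] [] pos h3, slot4A_noop_str g [] [] pos hni4 h4,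
    slot5A_noop_str g [] [] pos h5]
  simp

-- the outer loop: the online machine equals A's chunk loop followed by the drain loop
theorem mainLemma (g : List String) : ∀ fuel pos C U S, g.length - pos < fuel → C.length < 6 →
    machineB (g.drop pos) 1 0 [] [] C U S =
      (let r := outerA g fuel pos C U S; (r.1, drainA g r.2.2.2 r.2.1, r.2.2.1)) := by
  intro fuel
  induction fuel with
  | zero => intro pos C U S hf; omega
  | succ fuel ih =>
    intro pos C U S hf hC
    by_cases hp : pos < g.length
    · cases hpl : place (g[pos]!) 1 0 with
      | none =>
        have hparse := pipe_none g pos hp hpl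
        have hm : machineB (g.drop pos) 1 0 [] [] C U S =
            machineB (g.drop (pos + 1)) 1 0 [] [] C (U ++ [g[pos]!]) S := by
          rw [List.drop_eq_getElem_cons hp, ← getElem!_pos g pos hp, machineB_fresh, hpl]
        rw [hm, ih (pos + 1) C (U ++ [g[pos]!]) S (by omega) hC]
        simp only [outerA, if_pos (And.intro hp hC), hparse]
      | some t =>
        obtain ⟨hm, hprog⟩ := SIM g pos C U S hp t hpl
        have hparse : parseOneChunkA g pos =
            (some (pipeA g pos).1, (pipeA g pos).2.2, (pipeA g pos).2.1) := by
          unfold parseOneChunkA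
          rw [show slot5A g (slot4A g (slot3A g (slot2A g (slot1A g ([], [], pos))))) = pipeA g pos from rfl]
          rw [if_neg (by omega)]
        have hfuel1 : 1 ≤ fuel := by omega
        rw [hm]
        simp only [outerA, if_pos (And.intro hp hC), hparse]
        unfold closeK
        by_cases hnp : (pipeA g pos).2.2 < g.length
        · rw [if_pos hnp]
          by_cases h6 : C.length + 1 = 6
          · rw [if_pos h6]
            obtain ⟨m, hfm⟩ : ∃ m, fuel = m + 1 := ⟨fuel - 1, by omega⟩
            subst hfm
            have hstop : ¬((pipeA g pos).2.2 < g.length ∧ (C ++ [(pipeA g pos).1]).length < 6) := by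
              rintro ⟨-, hl⟩
              rw [List.length_append, List.length_singleton] at hl
              omega
            simp only [outerA, if_neg hstop]
            rw [drain_eq]
          · rw [if_neg h6]
            rw [ih (pipeA g pos).2.2 (C ++ [(pipeA g pos).1]) U (S ++ [(pipeA g pos).2.1])
              (by omega) (by rw [List.length_append, List.length_singleton]; omega)]
        · rw [if_neg hnp]
          obtain ⟨m, hfm⟩ : ∃ m, fuel = m + 1 := ⟨fuel - 1, by omega⟩
          subst hfm
          have hstop : ¬((pipeA g pos).2.2 < g.length ∧ (C ++ [(pipeA g pos).1]).length < 6) := by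
            rintro ⟨hl, -⟩
            exact hnp hl
          simp only [outerA, if_neg hstop]
          rw [drain_eq]
          rw [List.drop_eq_nil_of_le (by omega : g.length ≤ (pipeA g pos).2.2), List.append_nil]
    · have hd : g.drop pos = [] := List.drop_eq_nil_of_le (by omega)
      rw [hd]
      simp only [machineB, if_true]
      have hstop : ¬(pos < g.length ∧ C.length < 6) := fun hc => hp hc.1
      simp only [outerA, if_neg hstop]
      rw [drain_eq, hd, List.append_nil]

-- ===== VERDICT (by name: the statement is the Claim_ definition above) =====
theorem parse_word_into_chunks_spec : Claim_equal_parse_word_into_chunks := by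
  intro w _
  unfold Spec_parse_word_into_chunks parse_word_into_chunks parse_word_into_chunks_alt
  simp only
  rw [tokenizer_eq]
  have h := mainLemma (evaB (PySem.Str.lower w).toList Buf.empty)
    ((evaB (PySem.Str.lower w).toList Buf.empty).length + 1) 0 [] [] [] (by omega) (by simp)
  rw [List.drop_zero] at h
  simp only at h
  rw [h]
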